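-- pv_equiv track=rewrite | github.com/candyer/codeforces | Round #636/d/d.py | solve
-- ===== SOURCE A (Python) =====
-- from itertools import accumulate
--
-- def solve(n, k, arr):
-- 	'''
-- 	1 <= t <= 10^4
-- 	2 <= n <= 2 * 10^5, n % 2 == 0
-- 	1 <= k <= 2 * 10^5
-- 	1 <= ai <= k
-- 	'''
-- 	count = [0] * (2 * k + 2)
-- 	for i in range(n // 2):
-- 		a, b = arr[i], arr[n - i - 1]
-- 		if a > b:
-- 			a, b = b, a
-- 		count[a + 1] += 1
-- 		count[b + k + 1] -= 1
--
-- 		count[a + b] += 1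
-- 		count[a + b + 1] -= 1
-- 	return n - max(accumulate(count))
-- ===== SOURCE B (Python) =====
-- def solve(n, k, arr):
--     m = n // 2
--     lows = []
--     highs = []
--     exact = {}
--     for i in range(m):
--         a, b = arr[i], arr[n - i - 1]
--         if a > b:
--             a, b = b, a
--         lows.append(a)
--         highs.append(b)
--         exact[a + b] = exact.get(a + b, 0) + 1
--     lows.sort()
--     highs.sort()
--     i = j = best = 0
--     for s in range(2, 2 * k + 1):
--         while i < m and lows[i] + 1 <= s:
--             i += 1
--         while j < m and highs[j] + k + 1 <= s:
--             j += 1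
--         best = max(best, i - j + exact.get(s, 0))
--     return n - best
-- ===== Notes on version B (the rewrite author's own statement) =====
-- stated objective: alternative
-- what changed: A merges per-pair interval deltas and exact-sum deltas into one difference array and takes the max of its running prefix sums; B instead sorts the per-pair minima and maxima and sweeps the candidate sums s=2..2k with two pointers (coverage = #mins<=s-1 minus #maxes<=s-1-k) plus a dict of exact pair-sum counts, maximising coverage+exact.
-- outside the precondition, e.g. on solve(2, 1, [0, 1]): A returns 0, B returns 1; on solve(6, 3, [1, 0, 2, -2, 3, 1]): A returns 3, B returns 2; on solve(1, 0, []): A returns 1, B returns 1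
import Mathlib
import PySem

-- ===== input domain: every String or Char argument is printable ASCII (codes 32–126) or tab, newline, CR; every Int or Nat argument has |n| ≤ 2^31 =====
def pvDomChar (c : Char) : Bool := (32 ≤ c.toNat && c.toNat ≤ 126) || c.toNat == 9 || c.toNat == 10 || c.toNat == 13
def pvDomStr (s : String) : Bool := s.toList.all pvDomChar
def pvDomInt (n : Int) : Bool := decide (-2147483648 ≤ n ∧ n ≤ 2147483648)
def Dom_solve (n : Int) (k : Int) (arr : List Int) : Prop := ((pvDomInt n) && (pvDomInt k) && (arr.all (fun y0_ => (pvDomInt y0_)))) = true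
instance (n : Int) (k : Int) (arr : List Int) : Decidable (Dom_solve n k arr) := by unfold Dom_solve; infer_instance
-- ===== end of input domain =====

-- B replaces A's merged difference-array + accumulate scan by a different algorithm: it sorts the
-- per-pair minima and maxima and sweeps the candidate sums with two pointers plus an exact-sum
-- counter; alternative structure (sort + two-pointer merge), same answer.


-- ===== PORT A =====
-- itertools.accumulate on a list of ints (running sums, no initial element)
def pyAccumulate (xs : List Int) : List Int := (xs.scanl (· + ·) 0).tail

-- loop body of A: sort the pair, add the interval delta and the exact-sum delta into one array
def bodyA (k : Int) (arr : List Int) (n : Int) (count : List Int) (i : Int) : List Int :=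
  let a := PySem.List.pyGetD arr i 0
  let b := PySem.List.pyGetD arr (n - i - 1) 0
  let p := if a > b then (b, a) else (a, b)
  let c1 := PySem.List.pySetD count (p.1 + 1) (PySem.List.pyGetD count (p.1 + 1) 0 + 1)
  let c2 := PySem.List.pySetD c1 (p.2 + k + 1) (PySem.List.pyGetD c1 (p.2 + k + 1) 0 - 1)
  let c3 := PySem.List.pySetD c2 (p.1 + p.2) (PySem.List.pyGetD c2 (p.1 + p.2) 0 + 1)
  PySem.List.pySetD c3 (p.1 + p.2 + 1) (PySem.List.pyGetD c3 (p.1 + p.2 + 1) 0 - 1)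

def solve (n : Int) (k : Int) (arr : List Int) : Int :=
  match PySem.List.max?
      (pyAccumulate ((PySem.List.pyRange 0 (PySem.Int.floordiv n 2) 1).foldl (bodyA k arr n)
        (List.replicate (2 * k + 2).toNat 0))) (fun x => x) with
  | some m => n - m
  | none => n  -- unreachable: max() on the empty list raises, excluded by Pre_solve (1 ≤ k)

-- ===== PORT B =====
-- build loop of B: sort the pair, append the min and the max, count the exact sum
def bodyBuild (k : Int) (arr : List Int) (n : Int)
    (st : List Int × List Int × PySem.Dict Int Int) (i : Int) :
    List Int × List Int × PySem.Dict Int Int :=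
  let a := PySem.List.pyGetD arr i 0
  let b := PySem.List.pyGetD arr (n - i - 1) 0
  let p := if a > b then (b, a) else (a, b)
  (st.1 ++ [p.1], st.2.1 ++ [p.2], st.2.2.insert (p.1 + p.2) (st.2.2.getD (p.1 + p.2) 0 + 1))

-- 'while i < m and xs[i] + off <= s: i += 1' (off = 1 for the lows, k + 1 for the highs)
def adv (xs : List Int) (m : Int) (off : Int) (s : Int) (i : Int) : Int :=
  if h : i < m ∧ PySem.List.pyGetD xs i 0 + off ≤ s then adv xs m off s (i + 1) else i
termination_by (m - i).toNat
decreasing_by omega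

-- sweep body of B: advance both pointers to sum s, track the best i - j + exact hits
def bodySweep (lows highs : List Int) (m k : Int) (ex : PySem.Dict Int Int)
    (st : Int × Int × Int) (s : Int) : Int × Int × Int :=
  let i := adv lows m 1 s st.1
  let j := adv highs m (k + 1) s st.2.1
  (i, j, max st.2.2 (i - j + ex.getD s 0))

def solve_alt (n : Int) (k : Int) (arr : List Int) : Int :=
  let m := PySem.Int.floordiv n 2
  let st := (PySem.List.pyRange 0 m 1).foldl (bodyBuild k arr n)
    ([], [], PySem.Dict.empty)
  let lows := PySem.List.sorted st.1 (fun x => x) false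
  let highs := PySem.List.sorted st.2.1 (fun x => x) false
  n - ((PySem.List.pyRange 2 (2 * k + 1) 1).foldl (bodySweep lows highs m k st.2.2)
    ((0 : Int), (0 : Int), (0 : Int))).2.2

-- ===== PRECONDITION & SPEC =====
-- Pre_solve is the problem's contract on what the loop touches: 1 <= k, the paired indices exist,
-- and every paired value arr[i], arr[n-i-1] (i < n//2) lies in [1, k]; outside it A raises
-- IndexError or returns an accidental value through Python's negative-index wraparound (k = 0 with
-- no pairs is also excluded).  The 'min' only caps the quantifier so Pre_ is fast to decide: with
-- the n//2 <= len(arr) conjunct it equals the quantifier over the full range 0..n//2.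
def Pre_solve (n : Int) (k : Int) (arr : List Int) : Prop :=
  1 ≤ k ∧ PySem.Int.floordiv n 2 ≤ (arr.length : Int) ∧
  ∀ i ∈ PySem.List.pyRange 0 (min (PySem.Int.floordiv n 2) (arr.length : Int)) 1,
    (1 ≤ PySem.List.pyGetD arr i 0 ∧ PySem.List.pyGetD arr i 0 ≤ k) ∧
    (1 ≤ PySem.List.pyGetD arr (n - i - 1) 0 ∧ PySem.List.pyGetD arr (n - i - 1) 0 ≤ k)
instance (n : Int) (k : Int) (arr : List Int) : Decidable (Pre_solve n k arr) := by
  unfold Pre_solve; infer_instance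
def pvWitness_solve : Int × Int × List Int := (2, 1, [1, 1])

def Spec_solve (n : Int) (k : Int) (arr : List Int) (out : Int) : Prop := out = solve_alt n k arr
instance (n : Int) (k : Int) (arr : List Int) (out : Int) : Decidable (Spec_solve n k arr out) := by
  unfold Spec_solve; infer_instance

-- ===== CLAIM (what is proved, stated in full; the proofs are below) =====
def Claim_equal_solve : Prop := ∀ (n : Int) (k : Int) (arr : List Int),
  Dom_solve n k arr → Pre_solve n k arr → Spec_solve n k arr (solve n k arr)

-- ===== LEMMAS AND PROOFS =====

-- the sorted pair at index i, and the list of all pairs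
def mkPair (arr : List Int) (n : Int) (i : Int) : Int × Int :=
  let a := PySem.List.pyGetD arr i 0
  let b := PySem.List.pyGetD arr (n - i - 1) 0
  if a > b then (b, a) else (a, b)

def pairsOf (arr : List Int) (n : Int) : List (Int × Int) :=
  (PySem.List.pyRange 0 (PySem.Int.floordiv n 2) 1).map (mkPair arr n)

-- A's loop body on an already-sorted pair
def stepA (k : Int) (count : List Int) (p : Int × Int) : List Int :=
  let c1 := PySem.List.pySetD count (p.1 + 1) (PySem.List.pyGetD count (p.1 + 1) 0 + 1)
  let c2 := PySem.List.pySetD c1 (p.2 + k + 1) (PySem.List.pyGetD c1 (p.2 + k + 1) 0 - 1)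
  let c3 := PySem.List.pySetD c2 (p.1 + p.2) (PySem.List.pyGetD c2 (p.1 + p.2) 0 + 1)
  PySem.List.pySetD c3 (p.1 + p.2 + 1) (PySem.List.pyGetD c3 (p.1 + p.2 + 1) 0 - 1)

-- B's build body on an already-sorted pair
def stepB (st : List Int × List Int × PySem.Dict Int Int) (p : Int × Int) :
    List Int × List Int × PySem.Dict Int Int :=
  (st.1 ++ [p.1], st.2.1 ++ [p.2], st.2.2.insert (p.1 + p.2) (st.2.2.getD (p.1 + p.2) 0 + 1))

-- the common value both programs maximise at sum s: interval coverage + exact hits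
def GFun (k : Int) (P : List (Int × Int)) (s : Int) : Int :=
  (P.countP (fun p => decide (p.1 + 1 ≤ s)) : Int)
    - (P.countP (fun p => decide (p.2 + k + 1 ≤ s)) : Int)
    + (P.countP (fun p => decide (p.1 + p.2 = s)) : Int)

def PBounds (k : Int) (P : List (Int × Int)) : Prop :=
  ∀ p ∈ P, 1 ≤ p.1 ∧ p.1 ≤ p.2 ∧ p.2 ≤ k

-- prefix sums via getD
def pref (xs : List Int) (t : Nat) : Int := ∑ j ∈ Finset.range t, xs.getD j 0

theorem pref_cons (x : Int) (xs : List Int) (t : Nat) :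
    pref (x :: xs) (t + 1) = x + pref xs t := by
  unfold pref
  rw [Finset.sum_range_succ' (fun j => (x :: xs).getD j 0) t]
  simp [add_comm]

theorem scanl_add_eq (xs : List Int) (a : Int) :
    xs.scanl (· + ·) a = (List.range (xs.length + 1)).map (fun t => a + pref xs t) := by
  induction xs generalizing a with
  | nil => simp [List.scanl_nil, pref]
  | cons x xs ih =>
    have hr : List.range ((x :: xs).length + 1) = 0 :: (List.range (xs.length + 1)).map Nat.succ := by
      rw [List.length_cons]; exact List.range_succ_eq_map
    rw [List.scanl_cons, ih (a + x), hr, List.map_cons, List.map_map]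
    congr 1
    · simp [pref]
    · apply List.map_congr_left
      intro t _
      simp only [Function.comp_apply, Nat.succ_eq_add_one]
      rw [pref_cons]
      ring

theorem pyAccumulate_eq (xs : List Int) :
    pyAccumulate xs = (List.range xs.length).map (fun t => pref xs (t + 1)) := by
  unfold pyAccumulate
  rw [scanl_add_eq, List.range_succ_eq_map, List.map_cons, List.map_map, List.tail_cons]
  apply List.map_congr_left
  intro t _
  simp [Function.comp]

theorem getD_set_ite (xs : List Int) (i j : Nat) (v : Int) (h : i < xs.length) :
    (xs.set i v).getD j 0 = if j = i then v else xs.getD j 0 := by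
  rcases eq_or_ne j i with rfl | hne
  · simp [List.getD_eq_getElem?_getD, h]
  · simp [List.getD_eq_getElem?_getD, List.getElem?_set_ne (Ne.symm hne), hne]

theorem pyGetD_nonneg_getD (xs : List Int) (p : Int) (hp : 0 ≤ p) (hlt : p < (xs.length : Int)) :
    PySem.List.pyGetD xs p 0 = xs.getD p.toNat 0 := by
  rw [PySem.List.pyGetD_eq_getElem xs 0 hp hlt]
  rw [List.getD_eq_getElem?_getD, List.getElem?_eq_getElem (by omega)]
  rfl

-- one pySetD "+= d" step, seen through getD
theorem getD_pySetD_add (xs : List Int) (p d : Int) (hp : 0 ≤ p) (hlt : p < (xs.length : Int))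
    (j : Nat) :
    (PySem.List.pySetD xs p (PySem.List.pyGetD xs p 0 + d)).getD j 0 =
      xs.getD j 0 + if (j : Int) = p then d else 0 := by
  rw [PySem.List.pySetD_of_nonneg xs _ hp]
  rw [getD_set_ite xs p.toNat j _ (by omega)]
  rw [pyGetD_nonneg_getD xs p hp hlt]
  rcases eq_or_ne (j : Int) p with he | hne
  · have hj : j = p.toNat := by omega
    subst hj
    rw [if_pos rfl, if_pos he]
  · have hj : j ≠ p.toNat := by omega
    rw [if_neg hj, if_neg hne, add_zero]

-- A's folded array, pointwise
theorem foldA_getD (k : Int) (hk : 1 ≤ k) (P : List (Int × Int)) :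
    ∀ (count : List Int), count.length = (2 * k + 2).toNat → PBounds k P →
    ∀ j : Nat, (P.foldl (stepA k) count).getD j 0 = count.getD j 0
      + (P.countP (fun p => decide (p.1 + 1 = (j : Int))) : Int)
      - (P.countP (fun p => decide (p.2 + k + 1 = (j : Int))) : Int)
      + (P.countP (fun p => decide (p.1 + p.2 = (j : Int))) : Int)
      - (P.countP (fun p => decide (p.1 + p.2 + 1 = (j : Int))) : Int) := by
  induction P with
  | nil => intro count _ _ j; simp
  | cons q P ih =>
    intro count hlen hb j
    obtain ⟨hq1, hq2, hq3⟩ := hb q (by simp)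
    have hLc : (count.length : Int) = 2 * k + 2 := by rw [hlen]; omega
    have hstep : ∀ j : Nat, (stepA k count q).getD j 0 = count.getD j 0
        + (if (j : Int) = q.1 + 1 then 1 else 0)
        + (if (j : Int) = q.2 + k + 1 then -1 else 0)
        + (if (j : Int) = q.1 + q.2 then 1 else 0)
        + (if (j : Int) = q.1 + q.2 + 1 then -1 else 0) := by
      intro j
      show (PySem.List.pySetD _ (q.1 + q.2 + 1) (PySem.List.pyGetD _ (q.1 + q.2 + 1) 0 - 1)).getD j 0 = _
      simp only [sub_eq_add_neg]
      rw [getD_pySetD_add _ (q.1 + q.2 + 1) (-1) (by omega)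
        (by rw [PySem.List.length_pySetD, PySem.List.length_pySetD, PySem.List.length_pySetD, hLc]; omega)]
      rw [getD_pySetD_add _ (q.1 + q.2) 1 (by omega)
        (by rw [PySem.List.length_pySetD, PySem.List.length_pySetD, hLc]; omega)]
      rw [getD_pySetD_add _ (q.2 + k + 1) (-1) (by omega)
        (by rw [PySem.List.length_pySetD, hLc]; omega)]
      rw [getD_pySetD_add _ (q.1 + 1) 1 (by omega) (by omega)]
    have hlen' : (stepA k count q).length = (2 * k + 2).toNat := by
      show (PySem.List.pySetD _ _ _).length = _
      rw [PySem.List.length_pySetD, PySem.List.length_pySetD, PySem.List.length_pySetD,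
        PySem.List.length_pySetD, hlen]
    rw [List.foldl_cons, ih (stepA k count q) hlen' (fun p hp => hb p (by simp [hp])) j, hstep j]
    simp only [List.countP_cons, decide_eq_true_eq]
    push_cast
    split_ifs <;> omega

theorem length_foldA (k : Int) (P : List (Int × Int)) (count : List Int) :
    (P.foldl (stepA k) count).length = count.length := by
  induction P generalizing count with
  | nil => rfl
  | cons q P ih =>
    rw [List.foldl_cons, ih]
    show (PySem.List.pySetD _ _ _).length = _
    rw [PySem.List.length_pySetD, PySem.List.length_pySetD, PySem.List.length_pySetD,
      PySem.List.length_pySetD]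

-- splitting a ≤-count at its boundary
theorem countP_le_split {α : Type} (P : List α) (f : α → Int) (s : Int) :
    P.countP (fun p => decide (f p ≤ s)) =
      P.countP (fun p => decide (f p ≤ s - 1)) + P.countP (fun p => decide (f p = s)) := by
  induction P with
  | nil => simp
  | cons q P ih =>
    simp only [List.countP_cons, ih, decide_eq_true_eq]
    split_ifs <;> omega

-- one step of GFun at its boundary
theorem GFun_step (k : Int) (P : List (Int × Int)) (s : Int) :
    GFun k P s = GFun k P (s - 1)
      + (P.countP (fun p => decide (p.1 + 1 = s)) : Int)
      - (P.countP (fun p => decide (p.2 + k + 1 = s)) : Int)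
      + (P.countP (fun p => decide (p.1 + p.2 = s)) : Int)
      - (P.countP (fun p => decide (p.1 + p.2 + 1 = s)) : Int) := by
  unfold GFun
  rw [countP_le_split P (fun p => p.1 + 1) s, countP_le_split P (fun p => p.2 + k + 1) s]
  have c6 : P.countP (fun p => decide (p.1 + p.2 + 1 = s)) =
      P.countP (fun p => decide (p.1 + p.2 = s - 1)) :=
    List.countP_congr (fun p _ => by
      simp only [decide_eq_true_eq, eq_iff_iff]; omega)
  rw [c6]
  push_cast
  ring

-- prefix sums of A's array compute GFun
theorem pref_foldA (k : Int) (hk : 1 ≤ k) (P : List (Int × Int)) (hb : PBounds k P)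
    (t : Nat) :
    pref (P.foldl (stepA k) (List.replicate (2 * k + 2).toNat 0)) t = GFun k P ((t : Int) - 1) := by
  have hrep : ∀ j : Nat, (List.replicate (2 * k + 2).toNat (0 : Int)).getD j 0 = 0 := by
    intro j
    rcases lt_or_ge j (2 * k + 2).toNat with h | h
    · exact List.getD_replicate _ h
    · exact List.getD_eq_default _ _ (by simpa using h)
  have hget := foldA_getD k hk P (List.replicate (2 * k + 2).toNat 0) (by simp) hb
  induction t with
  | zero =>
    unfold pref GFun
    rw [Finset.sum_range_zero]
    simp only [Nat.cast_zero]
    have e1 : P.countP (fun p => decide (p.1 + 1 ≤ (0 : Int) - 1)) = 0 :=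
      List.countP_eq_zero.mpr (fun p hp => by
        have := (hb p hp).1; simp only [decide_eq_true_eq]; omega)
    have e2 : P.countP (fun p => decide (p.2 + k + 1 ≤ (0 : Int) - 1)) = 0 :=
      List.countP_eq_zero.mpr (fun p hp => by
        have h1 := (hb p hp).1; have h2 := (hb p hp).2.1
        simp only [decide_eq_true_eq]; omega)
    have e3 : P.countP (fun p => decide (p.1 + p.2 = (0 : Int) - 1)) = 0 :=
      List.countP_eq_zero.mpr (fun p hp => by
        have h1 := (hb p hp).1; have h2 := (hb p hp).2.1
        simp only [decide_eq_true_eq]; omega)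
    rw [e1, e2, e3]
    simp
  | succ t iht =>
    unfold pref at iht ⊢
    have harg : ((t + 1 : Nat) : Int) - 1 = (t : Int) := by push_cast; ring
    rw [Finset.sum_range_succ, iht, hget t, hrep t, harg, GFun_step k P (t : Int)]
    have harg2 : (t : Int) - 1 = ((t : Nat) : Int) - 1 := rfl
    ring

-- GFun vanishes at 0, 1 and 2k+1
theorem GFun_zero (k : Int) (hk : 1 ≤ k) (P : List (Int × Int)) (hb : PBounds k P)
    (s : Int) (hs : s ≤ 1) : GFun k P s = 0 := by
  unfold GFun
  have e1 : P.countP (fun p => decide (p.1 + 1 ≤ s)) = 0 :=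
    List.countP_eq_zero.mpr (fun p hp => by
      have := (hb p hp).1; simp only [decide_eq_true_eq]; omega)
  have e2 : P.countP (fun p => decide (p.2 + k + 1 ≤ s)) = 0 :=
    List.countP_eq_zero.mpr (fun p hp => by
      have h1 := (hb p hp).1; have h2 := (hb p hp).2.1
      simp only [decide_eq_true_eq]; omega)
  have e3 : P.countP (fun p => decide (p.1 + p.2 = s)) = 0 :=
    List.countP_eq_zero.mpr (fun p hp => by
      have h1 := (hb p hp).1; have h2 := (hb p hp).2.1
      simp only [decide_eq_true_eq]; omega)
  rw [e1, e2, e3]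
  simp

theorem GFun_top (k : Int) (hk : 1 ≤ k) (P : List (Int × Int)) (hb : PBounds k P) :
    GFun k P (2 * k + 1) = 0 := by
  unfold GFun
  have e1 : P.countP (fun p => decide (p.1 + 1 ≤ 2 * k + 1)) = P.length :=
    List.countP_eq_length.mpr (fun p hp => by
      have h1 := (hb p hp).2.1; have h2 := (hb p hp).2.2
      simp only [decide_eq_true_eq]; omega)
  have e2 : P.countP (fun p => decide (p.2 + k + 1 ≤ 2 * k + 1)) = P.length :=
    List.countP_eq_length.mpr (fun p hp => by
      have := (hb p hp).2.2; simp only [decide_eq_true_eq]; omega)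
  have e3 : P.countP (fun p => decide (p.1 + p.2 = 2 * k + 1)) = 0 :=
    List.countP_eq_zero.mpr (fun p hp => by
      have h1 := (hb p hp).2.1; have h2 := (hb p hp).2.2
      simp only [decide_eq_true_eq]; omega)
  rw [e1, e2, e3]
  simp

-- B's build loop, in closed form
theorem buildFold (P : List (Int × Int)) :
    ∀ (l h : List Int) (d : PySem.Dict Int Int),
    P.foldl stepB (l, h, d) = (l ++ P.map Prod.fst, h ++ P.map Prod.snd,
      P.foldl (fun d p => d.insert (p.1 + p.2) (d.getD (p.1 + p.2) 0 + 1)) d) := by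
  induction P with
  | nil => intro l h d; simp
  | cons q P ih =>
    intro l h d
    rw [List.foldl_cons, List.foldl_cons]
    show P.foldl stepB (l ++ [q.1], h ++ [q.2], _) = _
    rw [ih]
    simp

-- the exact-sum dict counts pair sums
theorem exactD_getD (P : List (Int × Int)) (s : Int) :
    (P.foldl (fun d p => d.insert (p.1 + p.2) (d.getD (p.1 + p.2) 0 + 1))
        (PySem.Dict.empty : PySem.Dict Int Int)).getD s 0 =
      (P.countP (fun p => decide (p.1 + p.2 = s)) : Int) := by
  have h1 : P.foldl (fun d p => d.insert (p.1 + p.2) (d.getD (p.1 + p.2) 0 + 1))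
      (PySem.Dict.empty : PySem.Dict Int Int) =
      (P.map (fun p => p.1 + p.2)).foldl (fun d x => d.insert x (d.getD x 0 + 1))
        PySem.Dict.empty := by
    rw [List.foldl_map]
  rw [h1, PySem.Dict.getD_foldl_insert_add_one, PySem.Dict.getD_empty, zero_add,
    List.count_eq_countP, List.countP_map]
  congr 1

-- on a sorted list, a downward-closed predicate holds exactly on the first countP indices
theorem sorted_countP_facts (p : Int → Bool)
    (hmono : ∀ a b : Int, a ≤ b → p b = true → p a = true) :
    ∀ (xs : List Int), xs.Pairwise (· ≤ ·) →
    xs.countP p ≤ xs.length ∧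
    ∀ j : Nat, (hj : j < xs.length) → (j < xs.countP p ↔ p xs[j] = true) := by
  intro xs
  induction xs with
  | nil => intro _; exact ⟨le_refl 0, fun j hj => absurd hj (by simp)⟩
  | cons x xs ih =>
    intro hpw
    obtain ⟨hall, hxs⟩ := List.pairwise_cons.mp hpw
    obtain ⟨ihlen, ihidx⟩ := ih hxs
    by_cases hpx : p x = true
    · refine ⟨?_, ?_⟩
      · simp only [List.countP_cons, hpx, List.length_cons]
        simp
        omega
      · intro j hj
        cases j with
        | zero =>
          simp only [List.countP_cons, List.getElem_cons_zero, hpx, if_true]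
          exact iff_of_true (by omega) trivial
        | succ j =>
          have hj' : j < xs.length := by simpa using hj
          have hiff := ihidx j hj'
          simp only [List.countP_cons, hpx, List.getElem_cons_succ, if_true]
          exact Iff.trans (by omega : j + 1 < xs.countP p + 1 ↔ j < xs.countP p) hiff
    · have hz : xs.countP p = 0 := List.countP_eq_zero.mpr (fun y hy hpy =>
        hpx (hmono x y (hall y hy) hpy))
      have hc : (x :: xs).countP p = 0 := by
        simp [List.countP_cons, hz, hpx]
      refine ⟨by rw [hc]; simp, ?_⟩
      intro j hj
      rw [hc]
      cases j with
      | zero =>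
        simp only [List.getElem_cons_zero]
        exact iff_of_false (by omega) hpx
      | succ j =>
        have hj' : j < xs.length := by simpa using hj
        have hnp : ¬ p (xs[j]'hj') = true := fun hpy =>
          hpx (hmono x _ (hall _ (List.getElem_mem hj')) hpy)
        simp only [List.getElem_cons_succ]
        exact iff_of_false (by omega) hnp

-- the two-pointer advance lands on the count, on a sorted list
theorem adv_eq (xs : List Int) (off s : Int) (hs : xs.Pairwise (· ≤ ·)) :
    ∀ (i : Int), 0 ≤ i → i ≤ (xs.countP (fun x => decide (x + off ≤ s)) : Int) →
    adv xs (xs.length : Int) off s i = (xs.countP (fun x => decide (x + off ≤ s)) : Int) := by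
  have hmono : ∀ a b : Int, a ≤ b → decide (b + off ≤ s) = true → decide (a + off ≤ s) = true := by
    intro a b hab h
    simp only [decide_eq_true_eq] at *
    omega
  obtain ⟨hclen, hidx⟩ := sorted_countP_facts _ hmono xs hs
  set c : Nat := xs.countP (fun x => decide (x + off ≤ s)) with hc
  suffices key : ∀ (fuel : Nat) (i : Int), 0 ≤ i → i ≤ (c : Int) → ((c : Int) - i).toNat = fuel →
      adv xs (xs.length : Int) off s i = (c : Int) by
    intro i h0 hle
    exact key _ i h0 hle rfl
  intro fuel
  induction fuel with
  | zero =>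
    intro i h0 hle hf
    have hi : i = (c : Int) := by omega
    subst hi
    rw [adv, dif_neg]
    rintro ⟨h1, h2⟩
    rw [PySem.List.pyGetD_eq_getElem xs 0 (by omega) h1] at h2
    simp only [Int.toNat_natCast] at h2
    have hcl : c < xs.length := by omega
    have hx := (hidx c hcl).mpr (by simp only [decide_eq_true_eq]; exact h2)
    exact absurd hx (lt_irrefl c)
  | succ fuel ihf =>
    intro i h0 hle hf
    have hic : i < (c : Int) := by omega
    have hil : i < (xs.length : Int) := by omega
    rw [adv, dif_pos]
    · exact ihf (i + 1) (by omega) (by omega) (by omega)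
    · refine ⟨hil, ?_⟩
      rw [PySem.List.pyGetD_eq_getElem xs 0 h0 hil]
      have := (hidx i.toNat (by omega)).mp (by omega)
      simpa using this

-- the sweep loop, in closed form
theorem sweepFold (lows highs : List Int) (m k : Int) (ex : PySem.Dict Int Int)
    (hml : (lows.length : Int) = m) (hmh : (highs.length : Int) = m)
    (hls : lows.Pairwise (· ≤ ·)) (hhs : highs.Pairwise (· ≤ ·))
    (hlb : ∀ x ∈ lows, 1 ≤ x) (hhb : ∀ x ∈ highs, 1 ≤ x) (hk : 1 ≤ k) (d : Nat) :
    (PySem.List.pyRange 2 (2 + (d : Int)) 1).foldl (bodySweep lows highs m k ex)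
        ((0 : Int), (0 : Int), (0 : Int)) =
      ((lows.countP (fun x => decide (x + 1 ≤ 1 + (d : Int))) : Int),
       (highs.countP (fun x => decide (x + (k + 1) ≤ 1 + (d : Int))) : Int),
       List.foldl max 0 ((List.range d).map (fun (j : Nat) =>
         (lows.countP (fun x => decide (x + 1 ≤ 2 + (j : Int))) : Int)
           - (highs.countP (fun x => decide (x + (k + 1) ≤ 2 + (j : Int))) : Int)
           + ex.getD (2 + (j : Int)) 0))) := by
  induction d with
  | zero =>
    rw [show (2 : Int) + ((0 : Nat) : Int) = 2 from by norm_num,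
      PySem.List.pyRange_one_eq_nil (le_refl 2), List.foldl_nil]
    have e1 : lows.countP (fun x => decide (x + 1 ≤ 1 + ((0 : Nat) : Int))) = 0 :=
      List.countP_eq_zero.mpr (fun x hx => by
        have := hlb x hx; simp only [decide_eq_true_eq, Nat.cast_zero]; omega)
    have e2 : highs.countP (fun x => decide (x + (k + 1) ≤ 1 + ((0 : Nat) : Int))) = 0 :=
      List.countP_eq_zero.mpr (fun x hx => by
        have := hhb x hx; simp only [decide_eq_true_eq, Nat.cast_zero]; omega)
    rw [e1, e2]
    simp
  | succ d ihd =>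
    have hcast : (2 : Int) + ((d + 1 : Nat) : Int) = (2 + (d : Int)) + 1 := by push_cast; ring
    rw [hcast, PySem.List.pyRange_one_succ_right (by omega), List.foldl_append, ihd,
      List.foldl_cons, List.foldl_nil]
    have hmonoL : lows.countP (fun x => decide (x + 1 ≤ 1 + (d : Int))) ≤
        lows.countP (fun x => decide (x + 1 ≤ 2 + (d : Int))) :=
      List.countP_mono_left (fun x _ h => by
        simp only [decide_eq_true_eq] at *; omega)
    have hmonoH : highs.countP (fun x => decide (x + (k + 1) ≤ 1 + (d : Int))) ≤
        highs.countP (fun x => decide (x + (k + 1) ≤ 2 + (d : Int))) :=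
      List.countP_mono_left (fun x _ h => by
        simp only [decide_eq_true_eq] at *; omega)
    have hadvL : adv lows m 1 (2 + (d : Int))
        ((lows.countP (fun x => decide (x + 1 ≤ 1 + (d : Int))) : Int)) =
        ((lows.countP (fun x => decide (x + 1 ≤ 2 + (d : Int))) : Int)) := by
      rw [← hml]
      exact adv_eq lows 1 (2 + (d : Int)) hls _ (by positivity) (by exact_mod_cast hmonoL)
    have hadvH : adv highs m (k + 1) (2 + (d : Int))
        ((highs.countP (fun x => decide (x + (k + 1) ≤ 1 + (d : Int))) : Int)) =
        ((highs.countP (fun x => decide (x + (k + 1) ≤ 2 + (d : Int))) : Int)) := by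
      rw [← hmh]
      exact adv_eq highs (k + 1) (2 + (d : Int)) hhs _ (by positivity) (by exact_mod_cast hmonoH)
    show (adv lows m 1 (2 + (d : Int)) _, adv highs m (k + 1) (2 + (d : Int)) _,
      max _ (adv lows m 1 (2 + (d : Int)) _ - adv highs m (k + 1) (2 + (d : Int)) _
        + ex.getD (2 + (d : Int)) 0)) = _
    rw [hadvL, hadvH]
    refine Prod.ext ?_ (Prod.ext ?_ ?_)
    · show ((lows.countP (fun x => decide (x + 1 ≤ 2 + (d : Int))) : Int)) =
        ((lows.countP (fun x => decide (x + 1 ≤ 1 + ((d + 1 : Nat) : Int))) : Int))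
      congr 1
      exact List.countP_congr (fun x _ => by
        simp only [decide_eq_true_eq, eq_iff_iff]; push_cast; omega)
    · show ((highs.countP (fun x => decide (x + (k + 1) ≤ 2 + (d : Int))) : Int)) =
        ((highs.countP (fun x => decide (x + (k + 1) ≤ 1 + ((d + 1 : Nat) : Int))) : Int))
      congr 1
      exact List.countP_congr (fun x _ => by
        simp only [decide_eq_true_eq, eq_iff_iff]; push_cast; omega)
    · show max _ _ = _
      rw [List.range_succ, List.map_append, List.foldl_append]
      simp

-- the two running maxima agree when g vanishes at 0, 1 and Lm
theorem max_bridge (g : Int → Int) (Lm d : Nat) (hd : d + 2 = Lm) (h3 : 3 ≤ Lm)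
    (h0 : g 0 = 0) (h1 : g 1 = 0) (hL : g (Lm : Int) = 0) :
    List.foldl max (g 0) ((List.range Lm).map (fun (t : Nat) => g ((t : Int) + 1))) =
      List.foldl max 0 ((List.range d).map (fun (j : Nat) => g (2 + (j : Int)))) := by
  apply le_antisymm
  · rcases PySem.List.foldl_max_mem ((List.range Lm).map (fun (t : Nat) => g ((t : Int) + 1))) (g 0)
      with hEq | hMem
    · rw [hEq, h0]
      exact (PySem.List.le_foldl_max _ 0).1
    · obtain ⟨t, htr, hy⟩ := List.mem_map.mp hMem
      have ht := List.mem_range.mp htr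
      rw [← hy]
      rcases Nat.eq_zero_or_pos t with rfl | ht1
      · rw [show ((0 : Nat) : Int) + 1 = 1 from by norm_num, h1]
        exact (PySem.List.le_foldl_max _ 0).1
      · rcases eq_or_lt_of_le (Nat.succ_le_of_lt ht) with ht2 | ht2
        · rw [show (t : Int) + 1 = (Lm : Int) from by omega, hL]
          exact (PySem.List.le_foldl_max _ 0).1
        · have hmm : g ((t : Int) + 1) ∈ (List.range d).map (fun (j : Nat) => g (2 + (j : Int))) := by
            refine List.mem_map.mpr ⟨t - 1, List.mem_range.mpr (by omega), ?_⟩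
            exact congrArg g (by omega)
          exact (PySem.List.le_foldl_max _ 0).2 _ hmm
  · rcases PySem.List.foldl_max_mem ((List.range d).map (fun (j : Nat) => g (2 + (j : Int)))) 0
      with hEq | hMem
    · rw [hEq]
      exact le_trans (le_of_eq h0.symm)
        (PySem.List.le_foldl_max ((List.range Lm).map (fun (t : Nat) => g ((t : Int) + 1))) (g 0)).1
    · obtain ⟨j, hjr, hy⟩ := List.mem_map.mp hMem
      have hj := List.mem_range.mp hjr
      rw [← hy]
      have hmm : g (2 + (j : Int)) ∈ (List.range Lm).map (fun (t : Nat) => g ((t : Int) + 1)) := by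
        refine List.mem_map.mpr ⟨j + 1, List.mem_range.mpr (by omega), ?_⟩
        exact congrArg g (by omega)
      exact (PySem.List.le_foldl_max _ (g 0)).2 _ hmm

-- a fold of max over zeros is zero
theorem foldl_max_zero (L : List Int) (h : ∀ x ∈ L, x = 0) : L.foldl max 0 = 0 := by
  induction L with
  | nil => rfl
  | cons x L ih =>
    rw [List.foldl_cons, h x (by simp), max_self]
    exact ih (fun y hy => h y (by simp [hy]))

-- ===== VERDICT (by name: the statement is the Claim_ definition above) =====
theorem solve_spec : Claim_equal_solve := by
  intro n k arr _ hPre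
  obtain ⟨hk, hlen, hvals⟩ := hPre
  rw [show min (PySem.Int.floordiv n 2) ((arr.length : Nat) : Int) = PySem.Int.floordiv n 2
    from by omega] at hvals
  show solve n k arr = solve_alt n k arr
  set P := pairsOf arr n with hPdef
  set exD := P.foldl (fun d p => d.insert (p.1 + p.2) (d.getD (p.1 + p.2) 0 + 1))
    (PySem.Dict.empty : PySem.Dict Int Int) with hexD
  have hPb : PBounds k P := by
    intro p hp
    obtain ⟨i, hi, rfl⟩ := List.mem_map.mp hp
    obtain ⟨⟨ha1, ha2⟩, hb1, hb2⟩ := hvals i hi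
    unfold mkPair
    dsimp only
    split_ifs with hgt
    · exact ⟨hb1, le_of_lt hgt, ha2⟩
    · exact ⟨ha1, by omega, hb2⟩
  obtain ⟨Lm, hLm, hLm3⟩ : ∃ Lm : Nat, (2 * k + 2).toNat = Lm + 1 ∧ 3 ≤ Lm :=
    ⟨(2 * k + 1).toNat, by omega, by omega⟩
  -- A's side in terms of GFun
  have hA : solve n k arr = n - List.foldl max (GFun k P 0)
      ((List.range Lm).map (fun (t : Nat) => GFun k P ((t : Int) + 1))) := by
    rw [solve]
    rw [show bodyA k arr n = fun c i => stepA k c (mkPair arr n i) from rfl]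
    rw [← List.foldl_map (f := mkPair arr n) (g := stepA k)]
    rw [show (PySem.List.pyRange 0 (PySem.Int.floordiv n 2) 1).map (mkPair arr n) = P from rfl]
    rw [pyAccumulate_eq, length_foldA, List.length_replicate, hLm, List.range_succ_eq_map,
      List.map_cons, List.map_map, PySem.List.max?_id_cons]
    have h1 : pref (P.foldl (stepA k) (List.replicate (Lm + 1) 0)) (0 + 1) = GFun k P 0 := by
      rw [← hLm, pref_foldA k hk P hPb (0 + 1)]
      exact congrArg (GFun k P) (by norm_num)
    have h2 : (List.range Lm).map
        ((fun t => pref (P.foldl (stepA k) (List.replicate (Lm + 1) 0)) (t + 1))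
          ∘ Nat.succ) =
        (List.range Lm).map (fun (t : Nat) => GFun k P ((t : Int) + 1)) :=
      List.map_congr_left (fun t _ => by
        simp only [Function.comp_apply, Nat.succ_eq_add_one]
        rw [← hLm, pref_foldA k hk P hPb (t + 1 + 1)]
        exact congrArg (GFun k P) (by push_cast; ring))
    rw [h1, h2]
  -- B's build loop in closed form
  have hst : (PySem.List.pyRange 0 (PySem.Int.floordiv n 2) 1).foldl (bodyBuild k arr n)
      ([], [], (PySem.Dict.empty : PySem.Dict Int Int)) =
      (P.map Prod.fst, P.map Prod.snd, exD) := by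
    rw [show bodyBuild k arr n = fun st i => stepB st (mkPair arr n i) from rfl]
    rw [← List.foldl_map (f := mkPair arr n) (g := stepB)]
    rw [show (PySem.List.pyRange 0 (PySem.Int.floordiv n 2) 1).map (mkPair arr n) = P from rfl]
    rw [buildFold P [] [] PySem.Dict.empty]
    simp [hexD]
  rw [hA, solve_alt]
  simp only [hst]
  by_cases hm0 : 0 ≤ PySem.Int.floordiv n 2
  · -- the sweep in closed form
    have hPlen : (P.length : Int) = PySem.Int.floordiv n 2 := by
      rw [hPdef]
      unfold pairsOf
      rw [List.length_map, PySem.List.length_pyRange_one]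
      omega
    have hllen : ((PySem.List.sorted (P.map Prod.fst) (fun x => x) false).length : Int) =
        PySem.Int.floordiv n 2 := by
      rw [PySem.List.length_sorted, List.length_map, hPlen]
    have hhlen : ((PySem.List.sorted (P.map Prod.snd) (fun x => x) false).length : Int) =
        PySem.Int.floordiv n 2 := by
      rw [PySem.List.length_sorted, List.length_map, hPlen]
    have hls : (PySem.List.sorted (P.map Prod.fst) (fun x => x) false).Pairwise (· ≤ ·) :=
      PySem.List.sorted_pairwise (P.map Prod.fst) (fun x => x)
    have hhs : (PySem.List.sorted (P.map Prod.snd) (fun x => x) false).Pairwise (· ≤ ·) :=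
      PySem.List.sorted_pairwise (P.map Prod.snd) (fun x => x)
    have hlb : ∀ x ∈ PySem.List.sorted (P.map Prod.fst) (fun x => x) false, 1 ≤ x := by
      intro x hx
      rw [PySem.List.mem_sorted] at hx
      obtain ⟨p, hp, rfl⟩ := List.mem_map.mp hx
      exact (hPb p hp).1
    have hhb : ∀ x ∈ PySem.List.sorted (P.map Prod.snd) (fun x => x) false, 1 ≤ x := by
      intro x hx
      rw [PySem.List.mem_sorted] at hx
      obtain ⟨p, hp, rfl⟩ := List.mem_map.mp hx
      obtain ⟨q1, q2, q3⟩ := hPb p hp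
      omega
    have hd2 : (2 * k + 1 : Int) = 2 + (((2 * k - 1).toNat : Nat) : Int) := by omega
    rw [hd2, sweepFold _ _ _ _ _ hllen hhlen hls hhs hlb hhb hk ((2 * k - 1).toNat)]
    set d := (2 * k - 1).toNat with hddef
    -- each sweep entry is GFun
    have hentry : (List.range d).map (fun (j : Nat) =>
        ((PySem.List.sorted (P.map Prod.fst) (fun x => x) false).countP
            (fun x => decide (x + 1 ≤ 2 + (j : Int))) : Int)
          - ((PySem.List.sorted (P.map Prod.snd) (fun x => x) false).countP
            (fun x => decide (x + (k + 1) ≤ 2 + (j : Int))) : Int)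
          + exD.getD (2 + (j : Int)) 0) =
        (List.range d).map (fun (j : Nat) => GFun k P (2 + (j : Int))) := by
      apply List.map_congr_left
      intro j _
      have hL : (PySem.List.sorted (P.map Prod.fst) (fun x => x) false).countP
          (fun x => decide (x + 1 ≤ 2 + (j : Int))) =
          P.countP (fun p => decide (p.1 + 1 ≤ 2 + (j : Int))) := by
        rw [(PySem.List.sorted_perm (P.map Prod.fst) (fun x => x) false).countP_eq,
          List.countP_map]
        exact List.countP_congr (fun p _ => by simp [Function.comp_apply])
      have hH : (PySem.List.sorted (P.map Prod.snd) (fun x => x) false).countP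
          (fun x => decide (x + (k + 1) ≤ 2 + (j : Int))) =
          P.countP (fun p => decide (p.2 + k + 1 ≤ 2 + (j : Int))) := by
        rw [(PySem.List.sorted_perm (P.map Prod.snd) (fun x => x) false).countP_eq,
          List.countP_map]
        exact List.countP_congr (fun p _ => by
          simp only [Function.comp_apply, decide_eq_true_eq]
          constructor <;> (intro h; omega))
      rw [hL, hH, hexD, exactD_getD]
      unfold GFun
      ring
    rw [hentry]
    have hbr := max_bridge (GFun k P) Lm d (by omega) hLm3
      (GFun_zero k hk P hPb 0 (by norm_num)) (GFun_zero k hk P hPb 1 (by norm_num))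
      (by rw [show ((Lm : Nat) : Int) = 2 * k + 1 from by omega]; exact GFun_top k hk P hPb)
    rw [hbr]
  · -- no pairs at all: both sides are n
    have hPnil : P = [] := by
      rw [hPdef]
      unfold pairsOf
      rw [PySem.List.pyRange_one_eq_nil (by omega)]
      rfl
    have hexnil : exD = PySem.Dict.empty := by rw [hexD, hPnil]; rfl
    have hsortnil : PySem.List.sorted (([] : List Int)) (fun x => x) false = [] := rfl
    have hstay : ∀ (L : List Int), L.foldl
        (bodySweep [] [] (PySem.Int.floordiv n 2) k PySem.Dict.empty)
        ((0 : Int), (0 : Int), (0 : Int)) = ((0 : Int), (0 : Int), (0 : Int)) := by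
      intro L
      induction L with
      | nil => rfl
      | cons s L ih =>
        rw [List.foldl_cons]
        have hadv : ∀ off : Int, adv ([] : List Int) (PySem.Int.floordiv n 2) off s 0 = 0 := by
          intro off
          rw [adv, dif_neg]
          rintro ⟨h1, _⟩
          omega
        have hz : bodySweep [] [] (PySem.Int.floordiv n 2) k PySem.Dict.empty
            ((0 : Int), (0 : Int), (0 : Int)) s = ((0 : Int), (0 : Int), (0 : Int)) := by
          show (adv ([] : List Int) (PySem.Int.floordiv n 2) 1 s 0,
            adv ([] : List Int) (PySem.Int.floordiv n 2) (k + 1) s 0,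
            max 0 (adv ([] : List Int) (PySem.Int.floordiv n 2) 1 s 0
              - adv ([] : List Int) (PySem.Int.floordiv n 2) (k + 1) s 0
              + PySem.Dict.empty.getD s 0)) = _
          rw [hadv 1, hadv (k + 1), PySem.Dict.getD_empty]
          norm_num
        rw [hz]
        exact ih
    rw [hPnil] at *
    simp only [List.map_nil, hsortnil, hexnil, hstay]
    have hzero : List.foldl max (GFun k [] 0)
        ((List.range Lm).map (fun (t : Nat) => GFun k ([] : List (Int × Int)) ((t : Int) + 1))) = 0 := by
      have hG : ∀ s : Int, GFun k ([] : List (Int × Int)) s = 0 := fun s => by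
        simp [GFun]
      rw [hG 0]
      apply foldl_max_zero
      intro x hx
      obtain ⟨t, _, rfl⟩ := List.mem_map.mp hx
      exact hG _
    rw [hzero]
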